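-- pv_equiv track=rewrite | github.com/uascodn/logslice | logslice/columns.py | reorder_columns
-- ===== SOURCE A (Python) =====
-- from typing import Any, Dict, Iterable, Iterator, List, Optional
--
-- def reorder_columns(
--     record: Dict[str, Any],
--     columns: List[str],
-- ) -> Dict[str, Any]:
--     """Return a new record with *columns* first, remaining keys appended.
--
--     Keys in *columns* that are absent from *record* are skipped.
--     """
--     result: Dict[str, Any] = {}
--     for col in columns:
--         if col in record:
--             result[col] = record[col]
--     for key, value in record.items():
--         if key not in result:
--             result[key] = value
--     return result
-- ===== SOURCE B (Python) =====
-- from typing import Any, Dict, List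
--
-- def reorder_columns(
--     record: Dict[str, Any],
--     columns: List[str],
-- ) -> Dict[str, Any]:
--     """Return a new record with *columns* first, remaining keys appended.
--
--     Single stable pass: rank every key by one integer -- the first index of
--     the key in *columns* if it is a column, else len(columns) + its position
--     in *record* (so the remaining keys keep record order after all columns).
--     """
--     priority: Dict[str, int] = {}
--     for i, col in enumerate(columns):
--         priority.setdefault(col, i)
--     m = len(columns)
--     pos = {k: i for i, k in enumerate(record)}
--     ordered = sorted(record, key=lambda k: priority.get(k, m + pos[k]))
--     return {k: record[k] for k in ordered}
-- ===== Notes on version B (the rewrite author's own statement) =====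
-- stated objective: alternative
-- what changed: A builds the result incrementally with two passes that test membership against the growing result dict; B instead assigns every record key one integer rank (its first index in columns if it is a column, else len(columns) plus its position in the record) and produces the output by a single sort of the record's keys under that rank.
import Mathlib
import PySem

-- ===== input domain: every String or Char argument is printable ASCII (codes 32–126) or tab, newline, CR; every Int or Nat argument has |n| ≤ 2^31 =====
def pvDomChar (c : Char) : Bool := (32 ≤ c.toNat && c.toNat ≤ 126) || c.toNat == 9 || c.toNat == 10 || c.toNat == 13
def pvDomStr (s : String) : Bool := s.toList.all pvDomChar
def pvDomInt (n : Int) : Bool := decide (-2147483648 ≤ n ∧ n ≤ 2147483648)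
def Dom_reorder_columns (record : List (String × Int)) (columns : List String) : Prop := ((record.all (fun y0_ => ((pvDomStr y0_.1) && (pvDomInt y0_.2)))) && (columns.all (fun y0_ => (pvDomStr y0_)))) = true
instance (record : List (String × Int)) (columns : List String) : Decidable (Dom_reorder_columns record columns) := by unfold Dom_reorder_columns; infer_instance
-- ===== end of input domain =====

-- B replaces A's two incremental passes (membership-tested against the growing result)
-- by one stable sort of the record's keys under a single integer rank; not faster ('alternative').

-- ===== PORT A =====
-- A's two loops: insert present columns in columns order, then append the remaining items.
def reorder_columns (record : List (String × Int)) (columns : List String) : List (String × Int) :=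
  let d := PySem.Dict.ofList record
  let result := columns.foldl (fun res col =>
    if d.contains col then res.insert col (d.getD col 0) else res) PySem.Dict.empty
  let result := d.items.foldl (fun res kv =>
    if res.contains kv.1 then res else res.insert kv.1 kv.2) result
  result.items

-- ===== PORT B =====
-- B: rank every key by one integer (first index in columns, else len(columns) + position
-- in the record) and sort the keys once by that rank.
def reorder_columns_alt (record : List (String × Int)) (columns : List String) : List (String × Int) :=
  let d := PySem.Dict.ofList record
  let priority := (PySem.List.enumerate columns).foldl
    (fun pr p => pr.setdefault p.2 p.1) PySem.Dict.empty
  let m : Int := columns.length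
  let pos := (PySem.List.enumerate d.keys).foldl
    (fun pr p => pr.insert p.2 p.1) PySem.Dict.empty
  let ordered := PySem.List.sorted d.keys
    (fun k => priority.getD k (m + pos.getD k 0)) false
  ordered.map (fun k => (k, d.getD k 0))

-- ===== PRECONDITION & SPEC =====
def Spec_reorder_columns (record : List (String × Int)) (columns : List String) (out : List (String × Int)) : Prop := out = reorder_columns_alt record columns
instance (record : List (String × Int)) (columns : List String) (out : List (String × Int)) : Decidable (Spec_reorder_columns record columns out) := by unfold Spec_reorder_columns; infer_instance

-- ===== CLAIM (what is proved, stated in full; the proofs are below) =====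
def Claim_equal_reorder_columns : Prop := ∀ (record : List (String × Int)) (columns : List String), Dom_reorder_columns record columns → Spec_reorder_columns record columns (reorder_columns record columns)

-- ===== LEMMAS AND PROOFS =====

-- The keys A's first loop collects: columns that are in d, at their first occurrence, in order.
def pick (d : PySem.Dict String Int) : List String → List String → List String
  | [], _ => []
  | c :: cs, seen =>
    if d.contains c then
      (if seen.contains c then pick d cs seen else c :: pick d cs (c :: seen))
    else pick d cs seen

lemma pick_congr (d : PySem.Dict String Int) :
    ∀ (cs s1 s2 : List String), (∀ x, s1.contains x = s2.contains x) →
      pick d cs s1 = pick d cs s2 := by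
  intro cs
  induction cs with
  | nil => intro _ _ _; rfl
  | cons c cs ih =>
    intro s1 s2 h
    simp only [pick, h c]
    split_ifs with h1 h2
    · exact ih s1 s2 h
    · rw [ih (c :: s1) (c :: s2) ?_]
      intro x
      have hx := h x
      simp only [List.contains_cons, hx]
    · exact ih s1 s2 h

lemma mem_pick (d : PySem.Dict String Int) :
    ∀ (cs seen : List String) (c : String),
      c ∈ pick d cs seen ↔ c ∈ cs ∧ d.contains c = true ∧ seen.contains c = false := by
  intro cs
  induction cs with
  | nil => intro seen c; simp [pick]
  | cons x xs ih =>
    intro seen c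
    simp only [pick]
    split_ifs with h1 h2
    · rw [ih seen c]
      constructor
      · rintro ⟨h3, h4, h5⟩; exact ⟨List.mem_cons_of_mem _ h3, h4, h5⟩
      · rintro ⟨h3, h4, h5⟩
        rcases List.mem_cons.mp h3 with rfl | h3
        · rw [h2] at h5; cases h5
        · exact ⟨h3, h4, h5⟩
    · simp only [List.mem_cons, ih (x :: seen) c]
      constructor
      · rintro (rfl | ⟨h3, h4, h5⟩)
        · refine ⟨Or.inl rfl, h1, ?_⟩
          cases hsc : seen.contains c
          · rfl
          · exact absurd hsc h2
        · refine ⟨Or.inr h3, h4, ?_⟩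
          simp only [List.contains_cons, Bool.or_eq_false_iff] at h5
          exact h5.2
      · rintro ⟨h3, h4, h5⟩
        by_cases hcx : c = x
        · exact Or.inl hcx
        · rcases h3 with rfl | h3
          · exact Or.inl rfl
          · refine Or.inr ⟨h3, h4, ?_⟩
            simp only [List.contains_cons, Bool.or_eq_false_iff]
            refine ⟨?_, h5⟩
            simp [hcx]
    · rw [ih seen c]
      constructor
      · rintro ⟨h3, h4, h5⟩; exact ⟨List.mem_cons_of_mem _ h3, h4, h5⟩
      · rintro ⟨h3, h4, h5⟩
        rcases List.mem_cons.mp h3 with rfl | h3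
        · exact absurd h4 h1
        · exact ⟨h3, h4, h5⟩

lemma pick_pairwise (d : PySem.Dict String Int) :
    ∀ (cs seen : List String),
      (pick d cs seen).Pairwise (fun a b => List.idxOf a cs < List.idxOf b cs) := by
  intro cs
  induction cs with
  | nil => intro seen; simp [pick]
  | cons x xs ih =>
    intro seen
    have lift : ∀ (s : List String), (∀ a ∈ pick d xs s, a ≠ x) →
        (pick d xs s).Pairwise (fun a b => List.idxOf a (x :: xs) < List.idxOf b (x :: xs)) := by
      intro s hne
      refine List.Pairwise.imp_of_mem ?_ (ih s)
      intro a b ha hb hab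
      rw [List.idxOf_cons_ne _ (Ne.symm (hne a ha)), List.idxOf_cons_ne _ (Ne.symm (hne b hb))]
      omega
    simp only [pick]
    split_ifs with h1 h2
    · refine lift seen ?_
      intro a ha
      have hm := (mem_pick d xs seen a).mp ha
      rintro rfl
      rw [h2] at hm; exact absurd hm.2.2 (by simp)
    · refine List.Pairwise.cons ?_ (lift (x :: seen) ?_)
      · intro b hb
        have hm := (mem_pick d xs (x :: seen) b).mp hb
        have hbne : b ≠ x := by
          rintro rfl
          have : (b :: seen).contains b = true := by simp
          rw [this] at hm; exact absurd hm.2.2 (by simp)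
        rw [List.idxOf_cons_self, List.idxOf_cons_ne _ (Ne.symm hbne)]
        omega
      · intro a ha
        have hm := (mem_pick d xs (x :: seen) a).mp ha
        rintro rfl
        have : (a :: seen).contains a = true := by simp
        rw [this] at hm; exact absurd hm.2.2 (by simp)
    · refine lift seen ?_
      intro a ha
      have hm := (mem_pick d xs seen a).mp ha
      rintro rfl
      exact h1 hm.2.1

lemma priority_get? :
    ∀ (cols : List String) (s : Int) (a : PySem.Dict String Int) (c : String),
      ((PySem.List.enumerate cols s).foldl (fun pr p => pr.setdefault p.2 p.1) a).get? c
        = (a.get? c).or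
            (if c ∈ cols then some (s + (List.idxOf c cols : Int)) else none) := by
  intro cols
  induction cols with
  | nil =>
    intro s a c
    simp [PySem.List.enumerate]
  | cons x xs ih =>
    intro s a c
    have hshift : c ≠ x →
        (if c ∈ xs then some (s + 1 + (List.idxOf c xs : Int)) else none)
          = (if c ∈ (x :: xs) then some (s + (List.idxOf c (x :: xs) : Int)) else none) := by
      intro hcx
      by_cases hm : c ∈ xs
      · rw [if_pos hm, if_pos (List.mem_cons_of_mem _ hm),
          List.idxOf_cons_ne _ (Ne.symm hcx)]
        congr 1
        push_cast [Nat.succ_eq_add_one]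
        ring
      · rw [if_neg hm, if_neg (by simp [hcx, hm])]
    rw [PySem.List.enumerate_cons]
    simp only [List.foldl_cons]
    have hsd : a.setdefault x s = if a.contains x then a else a.insert x s := by
      split_ifs with h <;> simp [PySem.Dict.setdefault, PySem.Dict.insert, h]
    rw [hsd]
    by_cases h : a.contains x = true
    · rw [if_pos h, ih]
      cases hac : a.get? c with
      | some v => simp
      | none =>
        simp only [Option.none_or]
        have hcx : c ≠ x := by
          rintro rfl
          rw [PySem.Dict.contains_eq_isSome_get?, hac] at h
          cases h
        exact hshift hcx
    · rw [if_neg h, ih]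
      rw [PySem.Dict.get?_insert]
      have hanone : a.get? x = none := by
        cases hax : a.get? x with
        | none => rfl
        | some v =>
          rw [PySem.Dict.contains_eq_isSome_get?, hax] at h
          cases h rfl
      by_cases hcx : c = x
      · subst hcx
        rw [if_pos rfl, hanone, if_pos (List.mem_cons_self ..)]
        simp [List.idxOf_cons_self]
      · rw [if_neg hcx, hshift hcx]

lemma pos_get? :
    ∀ (l : List String) (s : Int) (a : PySem.Dict String Int) (c : String), l.Nodup →
      ((PySem.List.enumerate l s).foldl (fun pr p => pr.insert p.2 p.1) a).get? c
        = if c ∈ l then some (s + (List.idxOf c l : Int)) else a.get? c := by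
  intro l
  induction l with
  | nil => intro s a c _; simp [PySem.List.enumerate]
  | cons x xs ih =>
    intro s a c hnd
    rw [PySem.List.enumerate_cons]
    simp only [List.foldl_cons]
    rw [ih (s + 1) _ c (List.nodup_cons.mp hnd).2]
    by_cases hcx : c = x
    · subst hcx
      have hcxs : c ∉ xs := (List.nodup_cons.mp hnd).1
      rw [if_neg hcxs, if_pos (List.mem_cons_self ..), PySem.Dict.get?_insert, if_pos rfl]
      simp [List.idxOf_cons_self]
    · by_cases hm : c ∈ xs
      · rw [if_pos hm, if_pos (List.mem_cons_of_mem _ hm),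
          List.idxOf_cons_ne _ (Ne.symm hcx)]
        congr 1
        push_cast [Nat.succ_eq_add_one]
        ring
      · rw [if_neg hm, if_neg (by simp [hcx, hm]), PySem.Dict.get?_insert, if_neg hcx]

lemma first_fold (d : PySem.Dict String Int) :
    ∀ (cols : List String) (r : PySem.Dict String Int),
      r.keys.Nodup → (∀ p ∈ r.items, p.2 = d.getD p.1 0) →
      (cols.foldl (fun res col =>
          if d.contains col then res.insert col (d.getD col 0) else res) r).items
        = r.items ++ (pick d cols r.keys).map (fun c => (c, d.getD c 0)) := by
  intro cols
  induction cols with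
  | nil => intro r _ _; simp [pick]
  | cons x xs ih =>
    intro r hnd hval
    simp only [List.foldl_cons, pick]
    by_cases h1 : d.contains x = true
    · rw [if_pos h1, if_pos h1]
      by_cases h2 : r.keys.contains x = true
      · rw [if_pos h2]
        have hrc : r.contains x = true :=
          (PySem.Dict.contains_iff_mem_keys r x).mpr (by simpa using h2)
        have hitems : (r.insert x (d.getD x 0)).items = r.items := by
          rw [PySem.Dict.items_insert_of_contains r _ hrc]
          have heach : ∀ p ∈ r.items,
              (if p.1 == x then (x, d.getD x 0) else p) = p := by
            intro p hp
            by_cases he : p.1 = x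
            · have hv := hval p hp
              simp only [he, beq_self_eq_true, if_true]
              rw [← he, ← hv]
            · simp [he]
          rw [List.map_congr_left heach]
          exact List.map_id' r.items
        have hkeys : (r.insert x (d.getD x 0)).keys = r.keys :=
          PySem.Dict.keys_insert_of_contains r _ hrc
        have hv2 : ∀ p ∈ (r.insert x (d.getD x 0)).items, p.2 = d.getD p.1 0 := by
          intro p hp; rw [hitems] at hp; exact hval p hp
        rw [ih _ (by rw [hkeys]; exact hnd) hv2, hitems, hkeys]
      · rw [if_neg h2]
        have hxk : x ∉ r.keys := by simpa using h2
        have hrc : r.contains x = false := by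
          cases hc : r.contains x
          · rfl
          · exact absurd ((PySem.Dict.contains_iff_mem_keys r x).mp hc) hxk
        have hitems := PySem.Dict.items_insert_of_not_contains r (d.getD x 0) hrc
        have hkeys := PySem.Dict.keys_insert_of_not_contains r (d.getD x 0) hrc
        have hnd2 : (r.insert x (d.getD x 0)).keys.Nodup := by
          rw [hkeys]
          refine hnd.append (List.nodup_singleton x) ?_
          intro a ha hb
          rw [List.mem_singleton] at hb
          exact hxk (hb ▸ ha)
        have hv2 : ∀ p ∈ (r.insert x (d.getD x 0)).items, p.2 = d.getD p.1 0 := by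
          intro p hp
          rw [hitems] at hp
          rcases List.mem_append.mp hp with hp | hp
          · exact hval p hp
          · simp only [List.mem_singleton] at hp
            subst hp
            rfl
        rw [ih _ hnd2 hv2, hitems, hkeys]
        rw [pick_congr d xs (r.keys ++ [x]) (x :: r.keys)
          (fun y => by simp [Bool.or_comm])]
        simp
    · rw [if_neg h1, if_neg h1]
      exact ih r hnd hval

lemma second_fold :
    ∀ (l : List (String × Int)) (r : PySem.Dict String Int), (l.map Prod.fst).Nodup →
      (l.foldl (fun res kv =>
          if res.contains kv.1 then res else res.insert kv.1 kv.2) r).items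
        = r.items ++ l.filter (fun kv => !(r.contains kv.1)) := by
  intro l
  induction l with
  | nil => intro r _; simp
  | cons c cs ih =>
    intro r hnd
    rw [List.map_cons] at hnd
    have hhead : c.1 ∉ cs.map Prod.fst := (List.nodup_cons.mp hnd).1
    have htail : (cs.map Prod.fst).Nodup := (List.nodup_cons.mp hnd).2
    simp only [List.foldl_cons, List.filter_cons]
    by_cases h1 : r.contains c.1 = true
    · rw [if_pos h1, ih r htail, h1]
      simp
    · have h1f : r.contains c.1 = false := by cases hc : r.contains c.1; rfl; exact absurd hc h1
      rw [if_neg h1, ih _ htail,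
        PySem.Dict.items_insert_of_not_contains r c.2 h1f, h1f]
      have hfc : ∀ kv ∈ cs,
          (!((r.insert c.1 c.2).contains kv.1)) = (!(r.contains kv.1)) := by
        intro kv hkv
        rw [PySem.Dict.contains_insert]
        have hne : kv.1 ≠ c.1 := by
          intro he
          exact hhead (he ▸ List.mem_map_of_mem hkv)
        simp [hne]
      rw [List.filter_congr hfc]
      simp

lemma items_filter_map (d : PySem.Dict String Int) :
    ∀ (l : List (String × Int)), (∀ p ∈ l, p.2 = d.getD p.1 0) → ∀ (q : String → Bool),
      l.filter (fun kv => q kv.1)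
        = ((l.map Prod.fst).filter q).map (fun k => (k, d.getD k 0)) := by
  intro l
  induction l with
  | nil => intro _ q; simp
  | cons p ps ih =>
    intro h q
    have hp : p = (p.1, d.getD p.1 0) := by
      have := h p (List.mem_cons_self ..)
      rw [← this]
    simp only [List.filter_cons, List.map_cons]
    by_cases hq : q p.1 = true
    · rw [if_pos hq, if_pos hq, List.map_cons,
        ih (fun r hr => h r (List.mem_cons_of_mem _ hr)) q, ← hp]
    · rw [if_neg hq, if_neg hq,
        ih (fun r hr => h r (List.mem_cons_of_mem _ hr)) q]

lemma filter_pairwise_idxOf :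
    ∀ (l : List String) (q : String → Bool), l.Nodup →
      (l.filter q).Pairwise (fun a b => List.idxOf a l < List.idxOf b l) := by
  intro l
  induction l with
  | nil => intro q _; simp
  | cons x xs ih =>
    intro q hnd
    have hx : x ∉ xs := (List.nodup_cons.mp hnd).1
    have lift : (xs.filter q).Pairwise
        (fun a b => List.idxOf a (x :: xs) < List.idxOf b (x :: xs)) := by
      refine List.Pairwise.imp_of_mem ?_ (ih q (List.nodup_cons.mp hnd).2)
      intro a b ha hb hab
      have ha' : a ≠ x := fun h => hx (h ▸ List.mem_of_mem_filter ha)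
      have hb' : b ≠ x := fun h => hx (h ▸ List.mem_of_mem_filter hb)
      rw [List.idxOf_cons_ne _ (Ne.symm ha'), List.idxOf_cons_ne _ (Ne.symm hb')]
      omega
    rw [List.filter_cons]
    by_cases hq : q x = true
    · rw [if_pos hq]
      refine List.Pairwise.cons ?_ lift
      intro b hb
      have hb' : b ≠ x := fun h => hx (h ▸ List.mem_of_mem_filter hb)
      rw [List.idxOf_cons_self, List.idxOf_cons_ne _ (Ne.symm hb')]
      omega
    · rw [if_neg hq]
      exact lift

lemma main_dict (d : PySem.Dict String Int) (columns : List String) (hnd : d.keys.Nodup) :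
    (d.items.foldl (fun res kv => if res.contains kv.1 then res else res.insert kv.1 kv.2)
      (columns.foldl (fun res col =>
        if d.contains col then res.insert col (d.getD col 0) else res) PySem.Dict.empty)).items
    = (PySem.List.sorted d.keys (fun k =>
        ((PySem.List.enumerate columns).foldl (fun pr p => pr.setdefault p.2 p.1)
            PySem.Dict.empty).getD k
          ((columns.length : Int) +
            ((PySem.List.enumerate d.keys).foldl (fun pr p => pr.insert p.2 p.1)
                PySem.Dict.empty).getD k 0)) false).map
        (fun k => (k, d.getD k 0)) := by
  have hkeys_items : ∀ (r : PySem.Dict String Int), r.keys = r.items.map Prod.fst :=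
    fun _ => rfl
  have hvald : ∀ p ∈ d.items, p.2 = d.getD p.1 0 := by
    intro p hp
    have hp' : (p.1, p.2) ∈ d.items := by simpa using hp
    exact (PySem.Dict.getD_of_mem_items d hp' hnd 0).symm
  set P := pick d columns [] with hPdef
  set K := (fun k =>
        ((PySem.List.enumerate columns).foldl (fun pr p => pr.setdefault p.2 p.1)
            PySem.Dict.empty).getD k
          ((columns.length : Int) +
            ((PySem.List.enumerate d.keys).foldl (fun pr p => pr.insert p.2 p.1)
                PySem.Dict.empty).getD k 0)) with hKdef
  set r1 := columns.foldl (fun res col =>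
      if d.contains col then res.insert col (d.getD col 0) else res) PySem.Dict.empty
    with hr1def
  -- A's first loop
  have hr1 : r1.items = P.map (fun c => (c, d.getD c 0)) := by
    rw [hr1def, first_fold d columns PySem.Dict.empty
      (by rw [show (PySem.Dict.empty : PySem.Dict String Int).keys = [] from rfl]
          exact List.nodup_nil)
      (fun p hp => absurd hp (by rw [show (PySem.Dict.empty : PySem.Dict String Int).items = [] from rfl] at hp; cases hp))]
    rfl
  have hr1keys : r1.keys = P := by
    rw [hkeys_items, hr1, List.map_map]
    have hcomp : Prod.fst ∘ (fun c : String => (c, d.getD c 0)) = id := rfl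
    rw [hcomp, List.map_id]
  -- A's second loop
  have hA : (d.items.foldl (fun res kv =>
        if res.contains kv.1 then res else res.insert kv.1 kv.2) r1).items
      = P.map (fun c => (c, d.getD c 0))
        ++ (d.keys.filter (fun k => !decide (k ∈ P))).map (fun k => (k, d.getD k 0)) := by
    rw [second_fold d.items r1 (by rw [← hkeys_items]; exact hnd), hr1]
    congr 1
    have hfc : ∀ kv ∈ d.items, (!(r1.contains kv.1)) = (!decide (kv.1 ∈ P)) := by
      intro kv _
      rw [PySem.Dict.contains_eq_decide_mem_keys, hr1keys]
    rw [List.filter_congr hfc,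
      items_filter_map d d.items hvald (fun k => !decide (k ∈ P)), ← hkeys_items]
  -- B's sorted order
  have hPmem : ∀ c, c ∈ P ↔ c ∈ columns ∧ c ∈ d.keys := by
    intro c
    rw [hPdef, mem_pick]
    simp [PySem.Dict.contains_iff_mem_keys]
  have hPnd : P.Nodup := by
    refine List.Pairwise.imp ?_ (pick_pairwise d columns [])
    intro a b hab he
    subst he
    omega
  have hfsub : ∀ k ∈ d.keys.filter (fun k => !decide (k ∈ P)), k ∈ d.keys ∧ k ∉ P := by
    intro k hk
    have h := List.mem_filter.mp hk
    exact ⟨h.1, by simpa using h.2⟩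
  have hOutNd : (P ++ d.keys.filter (fun k => !decide (k ∈ P))).Nodup := by
    refine hPnd.append (hnd.filter _) ?_
    intro a haP haF
    exact (hfsub a haF).2 haP
  have hOutPerm : (P ++ d.keys.filter (fun k => !decide (k ∈ P))).Perm d.keys := by
    rw [List.perm_ext_iff_of_nodup hOutNd hnd]
    intro a
    rw [List.mem_append]
    constructor
    · rintro (h | h)
      · exact ((hPmem a).mp h).2
      · exact (List.mem_filter.mp h).1
    · intro h
      by_cases hp : a ∈ P
      · exact Or.inl hp
      · exact Or.inr (List.mem_filter.mpr ⟨h, by simpa using hp⟩)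
  have hKcol : ∀ c ∈ columns, K c = (List.idxOf c columns : Int) := by
    intro c hc
    rw [hKdef]
    simp only []
    rw [PySem.Dict.getD_eq_get?_getD, priority_get? columns 0 PySem.Dict.empty c,
      PySem.Dict.get?_empty, Option.none_or, if_pos hc]
    simp
  have hKrest : ∀ k, k ∉ columns → k ∈ d.keys →
      K k = (columns.length : Int) + (List.idxOf k d.keys : Int) := by
    intro k h1 h2
    rw [hKdef]
    simp only []
    rw [PySem.Dict.getD_eq_get?_getD, priority_get? columns 0 PySem.Dict.empty k,
      PySem.Dict.get?_empty, Option.none_or, if_neg h1]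
    simp only [Option.getD_none]
    rw [PySem.Dict.getD_eq_get?_getD, pos_get? d.keys 0 PySem.Dict.empty k hnd, if_pos h2]
    simp
  have hpw : (P ++ d.keys.filter (fun k => !decide (k ∈ P))).Pairwise
      (fun a b => K a < K b) := by
    rw [List.pairwise_append]
    refine ⟨?_, ?_, ?_⟩
    · refine List.Pairwise.imp_of_mem ?_ (pick_pairwise d columns [])
      intro a b ha hb hab
      rw [hKcol a ((hPmem a).mp ha).1, hKcol b ((hPmem b).mp hb).1]
      exact_mod_cast hab
    · refine List.Pairwise.imp_of_mem ?_ (filter_pairwise_idxOf d.keys _ hnd)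
      intro a b ha hb hab
      have ha' := hfsub a ha
      have hb' := hfsub b hb
      have hac : a ∉ columns := fun hc => ha'.2 ((hPmem a).mpr ⟨hc, ha'.1⟩)
      have hbc : b ∉ columns := fun hc => hb'.2 ((hPmem b).mpr ⟨hc, hb'.1⟩)
      rw [hKrest a hac ha'.1, hKrest b hbc hb'.1]
      omega
    · intro a ha b hb
      have hacol := ((hPmem a).mp ha).1
      have hb' := hfsub b hb
      have hbc : b ∉ columns := fun hc => hb'.2 ((hPmem b).mpr ⟨hc, hb'.1⟩)
      rw [hKcol a hacol, hKrest b hbc hb'.1]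
      have hlen := List.idxOf_lt_length_of_mem hacol
      omega
  have hsort : PySem.List.sorted d.keys K false
      = P ++ d.keys.filter (fun k => !decide (k ∈ P)) :=
    PySem.List.sorted_eq_of_perm_of_pairwise_lt d.keys _ K hOutPerm hpw
  rw [hA, hsort, List.map_append]

-- ===== VERDICT (by name: the statement is the Claim_ definition above) =====
theorem reorder_columns_spec : Claim_equal_reorder_columns := by
  intro record columns _
  show reorder_columns record columns = reorder_columns_alt record columns
  exact main_dict (PySem.Dict.ofList record) columns (PySem.Dict.nodup_keys_ofList record)
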